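-- pv_equiv track=rewrite | github.com/vahapunlu/FP | fugueforge/core/harmony.py | _find_pivot_chord
-- ===== SOURCE A (Python) =====
-- _MAJOR_DEGREES = {1: 0, 2: 2, 3: 4, 4: 5, 5: 7, 6: 9, 7: 11}
--
-- _MINOR_DEGREES = {1: 0, 2: 2, 3: 3, 4: 5, 5: 7, 6: 8, 7: 11}  # raised 7th
--
-- def _triad(root_pc: int, quality: str) -> frozenset[int]:
--     """Build a triad from root pitch class and quality."""
--     if quality == "major":
--         return frozenset({root_pc, (root_pc + 4) % 12, (root_pc + 7) % 12})
--     elif quality == "minor":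
--         return frozenset({root_pc, (root_pc + 3) % 12, (root_pc + 7) % 12})
--     elif quality == "diminished":
--         return frozenset({root_pc, (root_pc + 3) % 12, (root_pc + 6) % 12})
--     else:  # augmented or fallback
--         return frozenset({root_pc, (root_pc + 4) % 12, (root_pc + 8) % 12})
--
-- def _build_diatonic_chords(tonic: int, is_minor: bool) -> dict[str, tuple[int, frozenset[int]]]:
--     """
--     Build all diatonic triads for a key.
--     Returns {roman_numeral: (root_pc, chord_pcs)}.
--     """
--     deg = _MINOR_DEGREES if is_minor else _MAJOR_DEGREES
--
--     if is_minor: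
--         # Natural minor + harmonic minor V
--         return {
--             "i":   ((tonic + deg[1]) % 12, _triad((tonic + deg[1]) % 12, "minor")),
--             "ii°": ((tonic + deg[2]) % 12, _triad((tonic + deg[2]) % 12, "diminished")),
--             "III": ((tonic + deg[3]) % 12, _triad((tonic + deg[3]) % 12, "major")),
--             "iv":  ((tonic + deg[4]) % 12, _triad((tonic + deg[4]) % 12, "minor")),
--             "V":   ((tonic + deg[5]) % 12, _triad((tonic + deg[5]) % 12, "major")),  # harmonic minor
--             "VI":  ((tonic + deg[6]) % 12, _triad((tonic + deg[6]) % 12, "major")),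
--             "vii°":((tonic + deg[7]) % 12, _triad((tonic + deg[7]) % 12, "diminished")),
--         }
--     else:
--         return {
--             "I":   ((tonic + deg[1]) % 12, _triad((tonic + deg[1]) % 12, "major")),
--             "ii":  ((tonic + deg[2]) % 12, _triad((tonic + deg[2]) % 12, "minor")),
--             "iii": ((tonic + deg[3]) % 12, _triad((tonic + deg[3]) % 12, "minor")),
--             "IV":  ((tonic + deg[4]) % 12, _triad((tonic + deg[4]) % 12, "major")),
--             "V":   ((tonic + deg[5]) % 12, _triad((tonic + deg[5]) % 12, "major")),
--             "vi":  ((tonic + deg[6]) % 12, _triad((tonic + deg[6]) % 12, "minor")),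
--             "vii°":((tonic + deg[7]) % 12, _triad((tonic + deg[7]) % 12, "diminished")),
--         }
--
-- def _find_pivot_chord(
--     from_tonic: int, from_minor: bool,
--     to_tonic: int, to_minor: bool,
-- ) -> tuple[str, int, frozenset[int]]:
--     """
--     Find a pivot chord common to both keys.
--     Returns (function_name, root_pc, chord_pcs).
--     """
--     from_chords = _build_diatonic_chords(from_tonic, from_minor)
--     to_chords = _build_diatonic_chords(to_tonic, to_minor)
--
--     # Find a chord whose pitch classes exist in both keys
--     for rn_from, (root_from, pcs_from) in from_chords.items():
--         for rn_to, (root_to, pcs_to) in to_chords.items():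
--             if pcs_from == pcs_to:
--                 return f"{rn_from}={rn_to}", root_from, pcs_from
--
--     # Fallback: use V of target key
--     dom_pc = (to_tonic + 7) % 12
--     return "V/new", dom_pc, _triad(dom_pc, "major")
-- ===== SOURCE B (Python) =====
-- _TABLE_MINOR = [
--     ("i",    0,  (0, 3, 7)),
--     ("ii°",  2,  (0, 3, 6)),
--     ("III",  3,  (0, 4, 7)),
--     ("iv",   5,  (0, 3, 7)),
--     ("V",    7,  (0, 4, 7)),
--     ("VI",   8,  (0, 4, 7)),
--     ("vii°", 11, (0, 3, 6)),
-- ]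
--
-- _TABLE_MAJOR = [
--     ("I",    0,  (0, 4, 7)),
--     ("ii",   2,  (0, 3, 7)),
--     ("iii",  4,  (0, 3, 7)),
--     ("IV",   5,  (0, 4, 7)),
--     ("V",    7,  (0, 4, 7)),
--     ("vi",   9,  (0, 3, 7)),
--     ("vii°", 11, (0, 3, 6)),
-- ]
--
--
-- def _chords(tonic: int, is_minor: bool) -> list:
--     """Diatonic triads of a key as [(roman, root_pc, pcs)], driven by a data table."""
--     table = _TABLE_MINOR if is_minor else _TABLE_MAJOR
--     return [
--         (rn, (tonic + off) % 12, frozenset((tonic + off + iv) % 12 for iv in ivs))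
--         for rn, off, ivs in table
--     ]
--
--
-- def _find_pivot_chord(
--     from_tonic: int, from_minor: bool,
--     to_tonic: int, to_minor: bool,
-- ):
--     # Index the target key's triads by canonical (sorted) pitch classes;
--     # reversed() so that earlier entries win, matching first-match semantics.
--     index = {
--         tuple(sorted(pcs)): rn
--         for rn, _root, pcs in reversed(_chords(to_tonic, to_minor))
--     }
--
--     # One pass over the source key's triads, one lookup each.
--     for rn_from, root_from, pcs_from in _chords(from_tonic, from_minor):
--         rn_to = index.get(tuple(sorted(pcs_from)))
--         if rn_to is not None:
--             return f"{rn_from}={rn_to}", root_from, pcs_from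
--
--     dom_pc = (to_tonic + 7) % 12
--     return "V/new", dom_pc, frozenset({dom_pc, (dom_pc + 4) % 12, (dom_pc + 7) % 12})
-- ===== Notes on version B (the rewrite author's own statement) =====
-- stated objective: alternative
-- what changed: B replaces A's hand-written per-key dict of seven triads and its nested from-by-to scan with a data-table-driven chord builder (one comprehension over a (roman, offset, intervals) table) plus a prebuilt dictionary indexing the target key's triads by sorted pitch classes, queried in a single pass over the source key's triads.
import Mathlib
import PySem

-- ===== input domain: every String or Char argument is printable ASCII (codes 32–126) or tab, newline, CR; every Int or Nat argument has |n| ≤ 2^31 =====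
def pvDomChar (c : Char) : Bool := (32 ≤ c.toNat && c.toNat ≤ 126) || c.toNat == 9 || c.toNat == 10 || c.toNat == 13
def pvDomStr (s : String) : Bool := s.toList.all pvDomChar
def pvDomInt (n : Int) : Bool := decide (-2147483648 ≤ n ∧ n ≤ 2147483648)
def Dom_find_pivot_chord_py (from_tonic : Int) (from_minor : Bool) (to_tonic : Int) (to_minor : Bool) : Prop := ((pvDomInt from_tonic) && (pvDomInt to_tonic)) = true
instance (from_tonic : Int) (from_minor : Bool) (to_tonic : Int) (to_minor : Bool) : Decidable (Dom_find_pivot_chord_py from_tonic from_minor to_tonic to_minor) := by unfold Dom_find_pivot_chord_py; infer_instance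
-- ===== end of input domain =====

-- B rebuilds each key's triads from a (roman, offset, intervals) data table and replaces A's
-- nested from-by-to scan with a target-key index dictionary plus one lookup pass (alternative structure).

-- ===== PORT A =====
def majorDegreesA : PySem.Dict Int Int :=
  PySem.Dict.ofList [(1, 0), (2, 2), (3, 4), (4, 5), (5, 7), (6, 9), (7, 11)]

def minorDegreesA : PySem.Dict Int Int :=
  PySem.Dict.ofList [(1, 0), (2, 2), (3, 3), (4, 5), (5, 7), (6, 8), (7, 11)]

-- frozenset of pitch classes → PySem.Set Int
def triadA (root_pc : Int) (quality : String) : List Int :=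
  if quality = "major" then
    PySem.Set.ofList [root_pc, PySem.Int.mod (root_pc + 4) 12, PySem.Int.mod (root_pc + 7) 12]
  else if quality = "minor" then
    PySem.Set.ofList [root_pc, PySem.Int.mod (root_pc + 3) 12, PySem.Int.mod (root_pc + 7) 12]
  else if quality = "diminished" then
    PySem.Set.ofList [root_pc, PySem.Int.mod (root_pc + 3) 12, PySem.Int.mod (root_pc + 6) 12]
  else
    PySem.Set.ofList [root_pc, PySem.Int.mod (root_pc + 4) 12, PySem.Int.mod (root_pc + 8) 12]

def buildDiatonicChordsA (tonic : Int) (is_minor : Bool) : PySem.Dict String (Int × List Int) :=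
  let deg := if is_minor then minorDegreesA else majorDegreesA
  if is_minor then
    PySem.Dict.ofList [
      ("i",    (PySem.Int.mod (tonic + deg.getD 1 0) 12, triadA (PySem.Int.mod (tonic + deg.getD 1 0) 12) "minor")),
      ("ii°",  (PySem.Int.mod (tonic + deg.getD 2 0) 12, triadA (PySem.Int.mod (tonic + deg.getD 2 0) 12) "diminished")),
      ("III",  (PySem.Int.mod (tonic + deg.getD 3 0) 12, triadA (PySem.Int.mod (tonic + deg.getD 3 0) 12) "major")),
      ("iv",   (PySem.Int.mod (tonic + deg.getD 4 0) 12, triadA (PySem.Int.mod (tonic + deg.getD 4 0) 12) "minor")),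
      ("V",    (PySem.Int.mod (tonic + deg.getD 5 0) 12, triadA (PySem.Int.mod (tonic + deg.getD 5 0) 12) "major")),
      ("VI",   (PySem.Int.mod (tonic + deg.getD 6 0) 12, triadA (PySem.Int.mod (tonic + deg.getD 6 0) 12) "major")),
      ("vii°", (PySem.Int.mod (tonic + deg.getD 7 0) 12, triadA (PySem.Int.mod (tonic + deg.getD 7 0) 12) "diminished"))]
  else
    PySem.Dict.ofList [
      ("I",    (PySem.Int.mod (tonic + deg.getD 1 0) 12, triadA (PySem.Int.mod (tonic + deg.getD 1 0) 12) "major")),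
      ("ii",   (PySem.Int.mod (tonic + deg.getD 2 0) 12, triadA (PySem.Int.mod (tonic + deg.getD 2 0) 12) "minor")),
      ("iii",  (PySem.Int.mod (tonic + deg.getD 3 0) 12, triadA (PySem.Int.mod (tonic + deg.getD 3 0) 12) "minor")),
      ("IV",   (PySem.Int.mod (tonic + deg.getD 4 0) 12, triadA (PySem.Int.mod (tonic + deg.getD 4 0) 12) "major")),
      ("V",    (PySem.Int.mod (tonic + deg.getD 5 0) 12, triadA (PySem.Int.mod (tonic + deg.getD 5 0) 12) "major")),
      ("vi",   (PySem.Int.mod (tonic + deg.getD 6 0) 12, triadA (PySem.Int.mod (tonic + deg.getD 6 0) 12) "minor")),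
      ("vii°", (PySem.Int.mod (tonic + deg.getD 7 0) 12, triadA (PySem.Int.mod (tonic + deg.getD 7 0) 12) "diminished"))]

-- inner 'for rn_to, (root_to, pcs_to) in to_chords.items()' loop of A
def scanToA (rn_from : String) (root_from : Int) (pcs_from : List Int) :
    List (String × Int × List Int) → Option (String × Int × List Int)
  | [] => none
  | (rn_to, (_, pcs_to)) :: rest =>
      if PySem.Set.equal pcs_from pcs_to then
        some (rn_from ++ "=" ++ rn_to, root_from, pcs_from)
      else scanToA rn_from root_from pcs_from rest

-- outer 'for rn_from, (root_from, pcs_from) in from_chords.items()' loop of A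
def scanFromA (to_items : List (String × Int × List Int)) :
    List (String × Int × List Int) → Option (String × Int × List Int)
  | [] => none
  | (rn_from, (root_from, pcs_from)) :: rest =>
      match scanToA rn_from root_from pcs_from to_items with
      | some r => some r
      | none => scanFromA to_items rest

def find_pivot_chord_py (from_tonic : Int) (from_minor : Bool) (to_tonic : Int) (to_minor : Bool) : String × Int × List Int :=
  let from_chords := buildDiatonicChordsA from_tonic from_minor
  let to_chords := buildDiatonicChordsA to_tonic to_minor
  match scanFromA to_chords.items from_chords.items with
  | some r => r
  | none =>
      let dom_pc := PySem.Int.mod (to_tonic + 7) 12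
      ("V/new", dom_pc, triadA dom_pc "major")

-- ===== PORT B =====
-- the (roman numeral, scale-degree offset, triad intervals) tables _TABLE_MINOR / _TABLE_MAJOR
def tableB (is_minor : Bool) : List (String × Int × List Int) :=
  if is_minor then
    [("i", 0, [0, 3, 7]), ("ii°", 2, [0, 3, 6]), ("III", 3, [0, 4, 7]), ("iv", 5, [0, 3, 7]),
     ("V", 7, [0, 4, 7]), ("VI", 8, [0, 4, 7]), ("vii°", 11, [0, 3, 6])]
  else
    [("I", 0, [0, 4, 7]), ("ii", 2, [0, 3, 7]), ("iii", 4, [0, 3, 7]), ("IV", 5, [0, 4, 7]),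
     ("V", 7, [0, 4, 7]), ("vi", 9, [0, 3, 7]), ("vii°", 11, [0, 3, 6])]

-- '_chords': one comprehension over the table; the frozenset is PySem.Set.ofList in generator order
def chordsB (tonic : Int) (is_minor : Bool) : List (String × Int × List Int) :=
  (tableB is_minor).map (fun e =>
    (e.1, PySem.Int.mod (tonic + e.2.1) 12,
     PySem.Set.ofList (e.2.2.map (fun iv => PySem.Int.mod (tonic + e.2.1 + iv) 12))))

-- 'tuple(sorted(pcs))' canonical key of a frozenset
def pcsKeyB (pcs : List Int) : List Int := PySem.List.sorted pcs (fun x => x) false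

-- the dict comprehension over reversed(chords(to_tonic, to_minor))
def indexB (to_chords : List (String × Int × List Int)) : PySem.Dict (List Int) String :=
  to_chords.reverse.foldl (fun d e => d.insert (pcsKeyB e.2.2) e.1) PySem.Dict.empty

-- single pass over the source key's triads, one 'index.get' each
def lookupPassB (index : PySem.Dict (List Int) String) :
    List (String × Int × List Int) → Option (String × Int × List Int)
  | [] => none
  | (rn_from, root_from, pcs_from) :: rest =>
      match index.get? (pcsKeyB pcs_from) with
      | some rn_to => some (rn_from ++ "=" ++ rn_to, root_from, pcs_from)
      | none => lookupPassB index rest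

def find_pivot_chord_py_alt (from_tonic : Int) (from_minor : Bool) (to_tonic : Int) (to_minor : Bool) : String × Int × List Int :=
  let index := indexB (chordsB to_tonic to_minor)
  match lookupPassB index (chordsB from_tonic from_minor) with
  | some r => r
  | none =>
      let dom_pc := PySem.Int.mod (to_tonic + 7) 12
      ("V/new", dom_pc,
       PySem.Set.ofList [dom_pc, PySem.Int.mod (dom_pc + 4) 12, PySem.Int.mod (dom_pc + 7) 12])

-- ===== PRECONDITION & SPEC =====
def Spec_find_pivot_chord_py (from_tonic : Int) (from_minor : Bool) (to_tonic : Int) (to_minor : Bool) (out : String × Int × List Int) : Prop := out = find_pivot_chord_py_alt from_tonic from_minor to_tonic to_minor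
instance (from_tonic : Int) (from_minor : Bool) (to_tonic : Int) (to_minor : Bool) (out : String × Int × List Int) : Decidable (Spec_find_pivot_chord_py from_tonic from_minor to_tonic to_minor out) := by unfold Spec_find_pivot_chord_py; infer_instance

-- ===== CLAIM =====
def Claim_equal_find_pivot_chord_py : Prop := ∀ (from_tonic : Int) (from_minor : Bool) (to_tonic : Int) (to_minor : Bool), Dom_find_pivot_chord_py from_tonic from_minor to_tonic to_minor → Spec_find_pivot_chord_py from_tonic from_minor to_tonic to_minor (find_pivot_chord_py from_tonic from_minor to_tonic to_minor)

-- ===== LEMMAS AND PROOFS =====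

-- reducing the tonic mod 12 leaves every chord pitch class unchanged
lemma mod12_add_mod12 (t d : Int) :
    PySem.Int.mod (PySem.Int.mod t 12 + d) 12 = PySem.Int.mod (t + d) 12 := by
  simp only [PySem.Int.mod_eq_emod_of_pos (by norm_num : (0:Int) < 12)]
  omega

lemma mod12_add_add_mod12 (t d e : Int) :
    PySem.Int.mod (PySem.Int.mod t 12 + d + e) 12 = PySem.Int.mod (t + d + e) 12 := by
  rw [add_assoc, mod12_add_mod12, ← add_assoc]

lemma buildA_mod (t : Int) (m : Bool) :
    buildDiatonicChordsA (PySem.Int.mod t 12) m = buildDiatonicChordsA t m := by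
  cases m <;> simp only [buildDiatonicChordsA, mod12_add_mod12]

lemma chordsB_mod (t : Int) (m : Bool) :
    chordsB (PySem.Int.mod t 12) m = chordsB t m := by
  cases m <;> simp only [chordsB, tableB, mod12_add_mod12, mod12_add_add_mod12]

lemma portA_mod (ft : Int) (fm : Bool) (tt : Int) (tm : Bool) :
    find_pivot_chord_py (PySem.Int.mod ft 12) fm (PySem.Int.mod tt 12) tm
      = find_pivot_chord_py ft fm tt tm := by
  simp only [find_pivot_chord_py, buildA_mod, mod12_add_mod12]

lemma portB_mod (ft : Int) (fm : Bool) (tt : Int) (tm : Bool) :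
    find_pivot_chord_py_alt (PySem.Int.mod ft 12) fm (PySem.Int.mod tt 12) tm
      = find_pivot_chord_py_alt ft fm tt tm := by
  simp only [find_pivot_chord_py_alt, chordsB_mod, mod12_add_mod12]

-- the finite core: all 12 × 2 × 12 × 2 reduced cases agree
set_option maxHeartbeats 4000000 in
lemma core_agree : ∀ (a b : Fin 12) (fm tm : Bool),
    find_pivot_chord_py ((a : Nat) : Int) fm ((b : Nat) : Int) tm
      = find_pivot_chord_py_alt ((a : Nat) : Int) fm ((b : Nat) : Int) tm := by
  decide

-- ===== VERDICT =====
theorem find_pivot_chord_py_spec : Claim_equal_find_pivot_chord_py := by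
  intro ft fm tt tm _
  unfold Spec_find_pivot_chord_py
  rw [← portA_mod, ← portB_mod]
  have hf0 : 0 ≤ PySem.Int.mod ft 12 := PySem.Int.mod_nonneg ft (by norm_num)
  have hf1 : PySem.Int.mod ft 12 < 12 := PySem.Int.mod_lt ft (by norm_num)
  have ht0 : 0 ≤ PySem.Int.mod tt 12 := PySem.Int.mod_nonneg tt (by norm_num)
  have ht1 : PySem.Int.mod tt 12 < 12 := PySem.Int.mod_lt tt (by norm_num)
  have hf : PySem.Int.mod ft 12 = (((PySem.Int.mod ft 12).toNat : Nat) : Int) := by omega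
  have ht : PySem.Int.mod tt 12 = (((PySem.Int.mod tt 12).toNat : Nat) : Int) := by omega
  rw [hf, ht]
  exact core_agree ⟨(PySem.Int.mod ft 12).toNat, by omega⟩ ⟨(PySem.Int.mod tt 12).toNat, by omega⟩ fm tm
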